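-- pv_equiv track=rewrite | github.com/incremen/py-unicode-golf | db.py | _apply_strategy
-- ===== SOURCE A (Python) =====
-- def _apply_strategy(strategy, parent_expr, offset):
--     """Given a strategy name, parent expression, and offset, build the full expression."""
--     if strategy == 'base':
--         return parent_expr  # parent_expr IS the expression for base anchors
--
--     # Apply the core operation
--     if strategy == 'triple':
--         expr = f'len(str(list(bytes({parent_expr}))))'
--     elif strategy == 'decrement':
--         expr = parent_expr  # offset handles the decrementing
--     elif strategy == 'quad_plus_3':
--         expr = f'len(str(bytes({parent_expr})))'
--     elif strategy == 'quint_plus_5':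
--         expr = f'len(ascii(str(bytes({parent_expr}))))'
--     elif strategy.startswith('ascii_exp_'):
--         k = int(strategy.split('_')[-1])
--         inner = f'str(bytes({parent_expr}))'
--         for _ in range(k):
--             inner = f'ascii({inner})'
--         expr = f'len({inner})'
--     elif strategy.startswith('zip_chain_'):
--         k = int(strategy.split('_')[-1])
--         inner = f'bytes({parent_expr})'
--         for _ in range(k):
--             inner = f'zip({inner})'
--         expr = f'len(str(list({inner})))'
--     elif strategy == 'triangular':
--         expr = f'sum(range({parent_expr}))'
--     elif strategy == 'bool_collapse':
--         expr = f'int(bool({parent_expr}))'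
--     elif strategy == 'log_step_down':
--         expr = f'len(str({parent_expr}))'
--     elif strategy == 'list_range_repr_len':
--         expr = f'len(str(list(range({parent_expr}))))'
--     else:
--         raise ValueError(f"Unknown strategy: {strategy}")
--
--     # Apply decrements
--     for _ in range(offset):
--         expr = f'max(range({expr}))'
--
--     return expr
-- ===== SOURCE B (Python) =====
-- _CHAINS = {
--     'triple': ['len', 'str', 'list', 'bytes'],
--     'decrement': [],
--     'quad_plus_3': ['len', 'str', 'bytes'],
--     'quint_plus_5': ['len', 'ascii', 'str', 'bytes'],
--     'triangular': ['sum', 'range'],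
--     'bool_collapse': ['int', 'bool'],
--     'log_step_down': ['len', 'str'],
--     'list_range_repr_len': ['len', 'str', 'list', 'range'],
-- }
--
--
-- def _apply_strategy(strategy, parent_expr, offset):
--     """Represent the expression as a chain of one-argument calls (outermost
--     first), then render the whole chain in one join: every strategy's output
--     is some call chain applied to parent_expr."""
--     if strategy == 'base':
--         return parent_expr
--     if strategy in _CHAINS:
--         chain = _CHAINS[strategy]
--     elif strategy.startswith('ascii_exp_'):
--         k = int(strategy.split('_')[-1])
--         chain = ['len'] + ['ascii'] * k + ['str', 'bytes']
--     elif strategy.startswith('zip_chain_'):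
--         k = int(strategy.split('_')[-1])
--         chain = ['len', 'str', 'list'] + ['zip'] * k + ['bytes']
--     else:
--         raise ValueError(f"Unknown strategy: {strategy}")
--     chain = ['max', 'range'] * offset + chain
--     return '('.join(chain + [parent_expr]) + ')' * len(chain)
-- ===== Notes on version B (the rewrite author's own statement) =====
-- stated objective: alternative
-- what changed: B changes the data representation: instead of assembling strings branch by branch with wrapping loops, it computes for every strategy a single list of one-argument call names (the call chain, outermost first, with the offset prepending ['max','range'] pairs) and renders the whole expression in one pass as '('.join(chain+[parent])+')' * len(chain).
import Mathlib
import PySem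

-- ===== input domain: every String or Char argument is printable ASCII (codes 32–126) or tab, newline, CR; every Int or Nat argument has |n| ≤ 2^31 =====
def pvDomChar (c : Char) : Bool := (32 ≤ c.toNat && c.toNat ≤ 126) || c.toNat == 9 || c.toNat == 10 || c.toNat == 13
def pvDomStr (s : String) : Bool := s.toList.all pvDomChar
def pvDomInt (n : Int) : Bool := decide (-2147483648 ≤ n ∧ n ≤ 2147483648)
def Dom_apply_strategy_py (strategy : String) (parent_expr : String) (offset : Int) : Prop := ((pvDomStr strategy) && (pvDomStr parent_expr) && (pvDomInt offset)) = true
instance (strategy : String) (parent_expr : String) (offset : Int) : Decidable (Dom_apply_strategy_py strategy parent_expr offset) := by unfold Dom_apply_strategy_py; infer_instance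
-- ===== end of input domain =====

-- B changes the representation: every output is a chain of one-argument calls, so B
-- computes that chain as a list of names and renders it in a single join.

-- ===== PORT A =====

-- 'for _ in range(n): s = pre + s + suf'  (shared shape of A's three wrapping loops)
def pvWrapLoop (pre suf : String) (n : Int) (inner : String) : String :=
  (PySem.List.pyRange 0 n 1).foldl (fun s _ => pre ++ s ++ suf) inner

-- k = int(strategy.split('_')[-1])  (total form; Pre_ guarantees ofStr? is some)
def pvSuffixK (strategy : String) : Int :=
  (PySem.Int.ofStr? ((PySem.List.pyGet? ((PySem.Str.split? strategy "_").getD []) (-1)).getD "")).getD 0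

def apply_strategy_py (strategy : String) (parent_expr : String) (offset : Int) : String :=
  if strategy == "base" then parent_expr
  else
    let expr : String :=
      if strategy == "triple" then "len(str(list(bytes(" ++ parent_expr ++ "))))"
      else if strategy == "decrement" then parent_expr
      else if strategy == "quad_plus_3" then "len(str(bytes(" ++ parent_expr ++ ")))"
      else if strategy == "quint_plus_5" then "len(ascii(str(bytes(" ++ parent_expr ++ "))))"
      else if PySem.Str.startswith strategy "ascii_exp_" then
        "len(" ++ pvWrapLoop "ascii(" ")" (pvSuffixK strategy) ("str(bytes(" ++ parent_expr ++ "))") ++ ")"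
      else if PySem.Str.startswith strategy "zip_chain_" then
        "len(str(list(" ++ pvWrapLoop "zip(" ")" (pvSuffixK strategy) ("bytes(" ++ parent_expr ++ ")") ++ ")))"
      else if strategy == "triangular" then "sum(range(" ++ parent_expr ++ "))"
      else if strategy == "bool_collapse" then "int(bool(" ++ parent_expr ++ "))"
      else if strategy == "log_step_down" then "len(str(" ++ parent_expr ++ "))"
      else if strategy == "list_range_repr_len" then "len(str(list(range(" ++ parent_expr ++ "))))"
      else ""  -- Python raises ValueError here; excluded by Pre_
    pvWrapLoop "max(range(" "))" offset expr

-- ===== PORT B =====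

-- k = int(strategy.split('_')[-1])  (B's own copy; total form, Pre_ guarantees ofStr? is some)
def pvSuffixKAlt (strategy : String) : Int :=
  (PySem.Int.ofStr? ((PySem.List.pyGet? ((PySem.Str.split? strategy "_").getD []) (-1)).getD "")).getD 0

-- Python 'lst * n' on a list: n copies of lst ([] for n ≤ 0)
def pvListMul {α : Type} (l : List α) (n : Int) : List α := (List.replicate n.toNat l).flatten

-- Python 'p * n' on str: n copies of p ('' for n ≤ 0)
def pvStrMul (p : String) (n : Int) : String := PySem.Str.join "" (List.replicate n.toNat p)

-- "'('.join(chain + [parent_expr]) + ')' * len(chain)"  (B's final render line)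
def pvRender (chain : List String) (p : String) : String :=
  PySem.Str.join "(" (chain ++ [p]) ++ pvStrMul ")" (chain.length : Int)

-- the _CHAINS dict: strategy name → call chain (outermost first)
def pvChains : PySem.Dict String (List String) := PySem.Dict.mk
  [ ("triple", ["len", "str", "list", "bytes"])
  , ("decrement", [])
  , ("quad_plus_3", ["len", "str", "bytes"])
  , ("quint_plus_5", ["len", "ascii", "str", "bytes"])
  , ("triangular", ["sum", "range"])
  , ("bool_collapse", ["int", "bool"])
  , ("log_step_down", ["len", "str"])
  , ("list_range_repr_len", ["len", "str", "list", "range"]) ]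

def apply_strategy_py_alt (strategy : String) (parent_expr : String) (offset : Int) : String :=
  if strategy == "base" then parent_expr
  else
    let chain0 : List String :=
      match PySem.Dict.get? pvChains strategy with
      | some c => c
      | none =>
        if PySem.Str.startswith strategy "ascii_exp_" then
          ["len"] ++ List.replicate (pvSuffixKAlt strategy).toNat "ascii" ++ ["str", "bytes"]
        else if PySem.Str.startswith strategy "zip_chain_" then
          ["len", "str", "list"] ++ List.replicate (pvSuffixKAlt strategy).toNat "zip" ++ ["bytes"]
        else []  -- Python raises ValueError here; excluded by Pre_
    let chain := pvListMul ["max", "range"] offset ++ chain0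
    pvRender chain parent_expr

-- ===== PRECONDITION & SPEC =====
-- Pre_ excludes exactly the inputs on which A raises: an unknown strategy name
-- (ValueError "Unknown strategy") and 'ascii_exp_…'/'zip_chain_…' names whose last
-- '_'-segment is not a valid int literal (ValueError from int()).
def Pre_apply_strategy_py (strategy : String) (parent_expr : String) (offset : Int) : Prop :=
  strategy ∈ ["base", "triple", "decrement", "quad_plus_3", "quint_plus_5",
              "triangular", "bool_collapse", "log_step_down", "list_range_repr_len"] ∨
  ((PySem.Str.startswith strategy "ascii_exp_" = true ∨
    PySem.Str.startswith strategy "zip_chain_" = true) ∧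
   (PySem.Int.ofStr? ((PySem.List.pyGet? ((PySem.Str.split? strategy "_").getD []) (-1)).getD "")).isSome = true)
instance (strategy : String) (parent_expr : String) (offset : Int) : Decidable (Pre_apply_strategy_py strategy parent_expr offset) := by unfold Pre_apply_strategy_py; infer_instance

def pvWitness_apply_strategy_py : String × String × Int := ("ascii_exp_2", "n", 1)

def Spec_apply_strategy_py (strategy : String) (parent_expr : String) (offset : Int) (out : String) : Prop := out = apply_strategy_py_alt strategy parent_expr offset
instance (strategy : String) (parent_expr : String) (offset : Int) (out : String) : Decidable (Spec_apply_strategy_py strategy parent_expr offset out) := by unfold Spec_apply_strategy_py; infer_instance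

-- ===== CLAIM (what is proved, stated in full; the proofs are below) =====
def Claim_equal_apply_strategy_py : Prop := ∀ (strategy : String) (parent_expr : String) (offset : Int), Dom_apply_strategy_py strategy parent_expr offset → Pre_apply_strategy_py strategy parent_expr offset → Spec_apply_strategy_py strategy parent_expr offset (apply_strategy_py strategy parent_expr offset)

-- ===== LEMMAS AND PROOFS =====

lemma pvStrMul_toList (p : String) (n : Int) :
    (pvStrMul p n).toList = (List.replicate n.toNat p.toList).flatten := by
  simp only [pvStrMul, PySem.Str.toList_join]
  generalize n.toNat = m
  induction m with
  | zero => simp [PySem.Chars.join_nil]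
  | succ k ih =>
      simp only [List.replicate_succ, List.map_cons, List.flatten_cons, ← ih]
      cases h : (List.replicate k p).map String.toList with
      | nil => simp [PySem.Chars.join_nil, PySem.Chars.join_singleton]
      | cons a l => simp [PySem.Chars.join_cons_cons]

lemma pvFlatRepComm {α : Type} (a : List α) (k : Nat) :
    (List.replicate k a).flatten ++ a = a ++ (List.replicate k a).flatten := by
  induction k with
  | zero => simp
  | succ j ih => simp only [List.replicate_succ, List.flatten_cons, List.append_assoc, ih]

lemma pvWrap_nat (pre suf inner : String) (m : Nat) :
    (pvWrapLoop pre suf (m : Int) inner).toList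
      = (List.replicate m pre.toList).flatten ++ inner.toList ++ (List.replicate m suf.toList).flatten := by
  induction m with
  | zero => simp [pvWrapLoop, PySem.List.pyRange_one_eq_nil]
  | succ k ih =>
      have h : ((k : Int) + 1) = ((k + 1 : Nat) : Int) := by omega
      have hr := PySem.List.pyRange_one_succ_right (a := 0) (b := (k : Int)) (by omega)
      simp only [pvWrapLoop] at ih ⊢
      rw [← h, hr, List.foldl_append]
      simp only [List.foldl_cons, List.foldl_nil, String.toList_append, ih]
      simp [List.replicate_succ, List.append_assoc, pvFlatRepComm]

-- A's wrapping loop, closed form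
lemma pvWrap_eq (pre suf : String) (n : Int) (inner : String) :
    pvWrapLoop pre suf n inner = pvStrMul pre n ++ inner ++ pvStrMul suf n := by
  apply String.toList_inj.mp
  simp only [String.toList_append, pvStrMul_toList]
  by_cases hn : n ≤ 0
  · have h0 : n.toNat = 0 := by omega
    simp [pvWrapLoop, PySem.List.pyRange_one_eq_nil hn, h0]
  · have h : n = (n.toNat : Int) := by omega
    rw [h, pvWrap_nat]; simp only [Int.toNat_natCast]

lemma pvRender_nil (p : String) : pvRender [] p = p := by
  apply String.toList_inj.mp
  simp [pvRender, pvStrMul_toList, PySem.Str.toList_join, PySem.Chars.join_singleton]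

lemma pvRender_cons (f : String) (chain : List String) (p : String) :
    pvRender (f :: chain) p = f ++ "(" ++ pvRender chain p ++ ")" := by
  apply String.toList_inj.mp
  have hc : ∃ q rest, chain ++ [p] = q :: rest := by
    cases chain with
    | nil => exact ⟨p, [], rfl⟩
    | cons a l => exact ⟨a, l ++ [p], rfl⟩
  obtain ⟨q, rest, hq⟩ := hc
  simp only [pvRender, String.toList_append, PySem.Str.toList_join, pvStrMul_toList,
    List.cons_append, hq, List.map_cons, PySem.Chars.join_cons_cons]
  have hlen : ((chain.length : Int) + 1).toNat = chain.length + 1 := by omega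
  have hl2 : ((chain.length : Int)).toNat = chain.length := by omega
  simp [List.length_cons, hlen, hl2, List.replicate_succ, List.append_assoc,
    Nat.cast_add, Nat.cast_one]
  rw [← List.replicate_succ, List.replicate_succ']

lemma pvStrMul_succ_left (p : String) (k : Nat) :
    pvStrMul p ((k + 1 : Nat) : Int) = p ++ pvStrMul p (k : Int) := by
  apply String.toList_inj.mp
  simp [pvStrMul_toList, List.replicate_succ]

lemma pvStrMul_succ_right (p : String) (k : Nat) :
    pvStrMul p ((k + 1 : Nat) : Int) = pvStrMul p (k : Int) ++ p := by
  apply String.toList_inj.mp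
  simp [pvStrMul_toList, List.replicate_succ, pvFlatRepComm]

-- rendering k identical wrappers in a row
lemma pvRender_rep (a : String) (k : Nat) (chain : List String) (p : String) :
    pvRender (List.replicate k a ++ chain) p
      = pvStrMul (a ++ "(") (k : Int) ++ pvRender chain p ++ pvStrMul ")" (k : Int) := by
  induction k with
  | zero =>
      apply String.toList_inj.mp
      simp [pvStrMul_toList]
  | succ j ih =>
      rw [List.replicate_succ, List.cons_append, pvRender_cons, ih,
          pvStrMul_succ_left (a ++ "(") j, pvStrMul_succ_right ")" j]
      simp [String.append_assoc]

-- rendering the offset's ['max','range'] pairs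
lemma pvRender_pairs (m : Nat) (chain : List String) (p : String) :
    pvRender ((List.replicate m (["max", "range"] : List String)).flatten ++ chain) p
      = pvStrMul "max(range(" (m : Int) ++ pvRender chain p ++ pvStrMul "))" (m : Int) := by
  induction m with
  | zero =>
      apply String.toList_inj.mp
      simp [pvStrMul_toList]
  | succ j ih =>
      rw [List.replicate_succ, List.flatten_cons]
      have : (["max", "range"] : List String) ++ ((List.replicate j (["max", "range"] : List String)).flatten ++ chain)
           = "max" :: "range" :: ((List.replicate j (["max", "range"] : List String)).flatten ++ chain) := rfl
      rw [List.append_assoc, this, pvRender_cons, pvRender_cons, ih,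
          pvStrMul_succ_left "max(range(" j, pvStrMul_succ_right "))" j]
      apply String.toList_inj.mp
      simp [String.toList_append, List.append_assoc]

-- B's offset step equals A's closed-form wrap for any Int offset
lemma pvRender_offset (o : Int) (chain : List String) (p : String) :
    pvRender (pvListMul ["max", "range"] o ++ chain) p
      = pvStrMul "max(range(" o ++ pvRender chain p ++ pvStrMul "))" o := by
  by_cases ho : o ≤ 0
  · have h0 : o.toNat = 0 := by omega
    have hs : ∀ q : String, pvStrMul q o = "" := by
      intro q; apply String.toList_inj.mp; simp [pvStrMul_toList, h0]
    apply String.toList_inj.mp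
    simp [pvListMul, h0, hs]
  · have h : o = (o.toNat : Int) := by omega
    rw [pvListMul, h, Int.toNat_natCast, pvRender_pairs]

-- two different startswith-prefixes of the same length cannot both hold
lemma pvNotBoth (s : String)
    (h : PySem.Str.startswith s "zip_chain_" = true) :
    PySem.Str.startswith s "ascii_exp_" = false := by
  by_contra hc
  have ha : PySem.Str.startswith s "ascii_exp_" = true := by
    cases hh : PySem.Str.startswith s "ascii_exp_" <;> simp_all
  have h1 := (PySem.Chars.startswith_iff _ _).mp (by simpa using h)
  have h2 := (PySem.Chars.startswith_iff _ _).mp (by simpa using ha)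
  have hle : ("zip_chain_".toList).length ≤ ("ascii_exp_".toList).length := by decide
  have := (List.prefix_of_prefix_length_le h1 h2 hle).eq_of_length (by decide)
  simp at this

-- a strategy with one of the two prefixes is none of the fixed names
lemma pvNeOfSw (s t pre : String) (h : PySem.Str.startswith s pre = true)
    (hb : PySem.Str.startswith t pre = false) : s ≠ t := by
  intro he; subst he; rw [h] at hb; exact Bool.noConfusion hb

-- ===== VERDICT (by name: the statement is the Claim_ definition above) =====
lemma pvToNatMax (n : Int) : (max n 0).toNat = n.toNat := by omega

-- pvStrMul only depends on n.toNat
lemma pvStrMul_castToNat (p : String) (n : Int) :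
    pvStrMul p ((n.toNat : Nat) : Int) = pvStrMul p n := by
  unfold pvStrMul; rw [Int.toNat_natCast]

theorem apply_strategy_py_spec : Claim_equal_apply_strategy_py := by
  intro s p o _ hP
  unfold Spec_apply_strategy_py
  rcases hP with hfix | ⟨hsw, _⟩
  · simp only [List.mem_cons, List.not_mem_nil, or_false] at hfix
    rcases hfix with h | h | h | h | h | h | h | h | h <;> subst h <;>
      simp only [apply_strategy_py, apply_strategy_py_alt, pvChains,
            PySem.Dict.get?, beq_iff_eq, pvWrap_eq, reduceIte, pvRender_offset] <;>
      · apply String.toList_inj.mp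
        simp [String.toList_append, List.append_assoc, pvRender_cons, pvRender_nil, PySem.Chars.startswith, List.isPrefixOf]
  · have hprefix : ∀ t ∈ ["base", "triple", "decrement", "quad_plus_3", "quint_plus_5",
        "triangular", "bool_collapse", "log_step_down", "list_range_repr_len"], s ≠ t := by
      intro t ht
      rcases hsw with hsw | hsw <;>
        fin_cases ht <;> exact pvNeOfSw _ _ _ hsw (by decide)
    have hne := fun t ht => Ne.symm (hprefix t ht)
    have hb : ∀ t ∈ ["triple", "decrement", "quad_plus_3", "quint_plus_5",
        "triangular", "bool_collapse", "log_step_down", "list_range_repr_len"],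
        (t == s) = false := fun t ht =>
      beq_eq_false_iff_ne.mpr (hne t (List.mem_cons_of_mem "base" ht))
    rcases hsw with hsw | hsw <;>
      [have hz : PySem.Str.startswith s "ascii_exp_" = true := hsw;
       have hz : PySem.Str.startswith s "ascii_exp_" = false := pvNotBoth s hsw] <;>
    · simp only [apply_strategy_py, apply_strategy_py_alt, pvChains,
        PySem.Dict.get?, beq_iff_eq, pvWrap_eq, hsw, hz, pvSuffixK, pvSuffixKAlt,
        hprefix "base" (by simp), hprefix "triple" (by simp), hprefix "decrement" (by simp),
        hprefix "quad_plus_3" (by simp), hprefix "quint_plus_5" (by simp),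
        hprefix "triangular" (by simp), hprefix "bool_collapse" (by simp),
        hprefix "log_step_down" (by simp), hprefix "list_range_repr_len" (by simp),
        hb "triple" (by simp), hb "decrement" (by simp),
        hb "quad_plus_3" (by simp), hb "quint_plus_5" (by simp),
        hb "triangular" (by simp), hb "bool_collapse" (by simp),
        hb "log_step_down" (by simp), hb "list_range_repr_len" (by simp),
        if_false, if_true, Bool.false_eq_true,
        List.find?_cons, Option.map, List.find?_nil]
      first
      | rw [show ∀ (X : List String), (["len"] : List String) ++ X ++ ["str", "bytes"]
            = "len" :: (X ++ ["str", "bytes"]) from fun _ => rfl]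
      | rw [show ∀ (X : List String), (["len", "str", "list"] : List String) ++ X ++ ["bytes"]
            = "len" :: "str" :: "list" :: (X ++ ["bytes"]) from fun _ => rfl]
      rw [pvRender_offset]
      apply String.toList_inj.mp
      simp [pvRender_cons, pvRender_rep, pvRender_nil, pvStrMul_castToNat,
        String.toList_append, List.append_assoc, pvStrMul_toList, pvToNatMax]
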